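-- pv_equiv track=rewrite | github.com/hackrootQAQ/graduation-design | define.py | stringSimilar
-- ===== SOURCE A (Python) =====
-- def stringSimilar(s1, s2):
--     l1 = len(s1); l2 = len(s2); p1 = 0; p2 = 0
--     while p1 < l1 and p2 < l2:
--         while p1 + 1 < l1 and s1[p1] == s1[p1 + 1]: p1 += 1
--         while p2 + 1 < l2 and s2[p2] == s2[p2 + 1]: p2 += 1
--         if s1[p1] != s2[p2]: return False
--         p1 += 1; p2 += 1
--     if p1 == l1 and p2 == l2: return True
--     return False
-- ===== SOURCE B (Python) =====
-- def stringSimilar(s1, s2):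
--     def collapse(s):
--         out = []
--         for c in s:
--             if not out or out[-1] != c:
--                 out.append(c)
--         return out
--     return collapse(s1) == collapse(s2)
-- ===== Notes on version B (the rewrite author's own statement) =====
-- stated objective: simpler
-- what changed: Replaces the synchronized two-pointer traversal with early mismatch return by two independent run-length collapse passes (direct iteration over characters) followed by a single list-equality comparison.
import Mathlib
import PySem

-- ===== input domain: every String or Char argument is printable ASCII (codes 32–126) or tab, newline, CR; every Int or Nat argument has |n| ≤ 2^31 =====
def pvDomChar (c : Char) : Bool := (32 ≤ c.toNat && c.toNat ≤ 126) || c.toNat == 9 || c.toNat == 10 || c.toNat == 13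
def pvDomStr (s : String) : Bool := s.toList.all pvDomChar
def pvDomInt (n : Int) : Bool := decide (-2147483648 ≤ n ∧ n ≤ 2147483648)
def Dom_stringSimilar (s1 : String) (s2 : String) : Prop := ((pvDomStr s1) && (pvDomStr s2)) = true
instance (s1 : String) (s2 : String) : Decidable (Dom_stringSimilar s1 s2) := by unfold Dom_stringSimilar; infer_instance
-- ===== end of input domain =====

-- B replaces A's synchronized two-pointer scan (early mismatch return) by two independent
-- run-length collapse passes and one list-equality comparison; objective: simpler.

-- ===== PORT A =====
-- inner while loop: `while p + 1 < l and s[p] == s[p + 1]: p += 1`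
-- (indexing s[p] is always in range here, so it is ported as getD)
def pvSkipRun (cs : List Char) (l : Nat) (p : Nat) : Nat :=
  if h : p + 1 < l ∧ cs.getD p ' ' = cs.getD (p + 1) ' ' then
    pvSkipRun cs l (p + 1)
  else p
termination_by l - p
decreasing_by omega

theorem pvSkipRun_ge (cs : List Char) (l p : Nat) : p ≤ pvSkipRun cs l p := by
  fun_induction pvSkipRun with
  | case1 p h ih => omega
  | case2 p h => omega

-- outer while loop of A
def pvLoop (cs1 cs2 : List Char) (l1 l2 : Nat) (p1 p2 : Nat) : Bool :=
  if h : p1 < l1 ∧ p2 < l2 then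
    let q1 := pvSkipRun cs1 l1 p1
    let q2 := pvSkipRun cs2 l2 p2
    if cs1.getD q1 ' ' ≠ cs2.getD q2 ' ' then false
    else pvLoop cs1 cs2 l1 l2 (q1 + 1) (q2 + 1)
  else p1 == l1 && p2 == l2
termination_by (l1 - p1) + (l2 - p2)
decreasing_by
  have h1 := pvSkipRun_ge cs1 l1 p1
  have h2 := pvSkipRun_ge cs2 l2 p2
  omega

def stringSimilar (s1 : String) (s2 : String) : Bool :=
  pvLoop s1.toList s2.toList s1.toList.length s2.toList.length 0 0

-- ===== PORT B =====
-- body of collapse's for-loop: `if not out or out[-1] != c: out.append(c)`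
-- (out[-1] on a nonempty list = getLast?; the `not out` short-circuit keeps it total)
def pvCollapseStep (out : List Char) (c : Char) : List Char :=
  if out.isEmpty || out.getLast? != some c then out ++ [c] else out

def pvCollapse (cs : List Char) : List Char := cs.foldl pvCollapseStep []

def stringSimilar_alt (s1 : String) (s2 : String) : Bool :=
  pvCollapse s1.toList == pvCollapse s2.toList

-- ===== PRECONDITION & SPEC =====
def Spec_stringSimilar (s1 : String) (s2 : String) (out : Bool) : Prop := out = stringSimilar_alt s1 s2
instance (s1 : String) (s2 : String) (out : Bool) : Decidable (Spec_stringSimilar s1 s2 out) := by unfold Spec_stringSimilar; infer_instance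

-- ===== CLAIM (what is proved, stated in full; the proofs are below) =====
def Claim_equal_stringSimilar : Prop := ∀ (s1 : String) (s2 : String), Dom_stringSimilar s1 s2 → Spec_stringSimilar s1 s2 (stringSimilar s1 s2)

-- ===== LEMMAS AND PROOFS =====

theorem pvSkipRun_lt (cs : List Char) (l p : Nat) (hp : p < l) : pvSkipRun cs l p < l := by
  fun_induction pvSkipRun with
  | case1 p h ih => exact ih (by omega)
  | case2 p h => exact hp


-- canonical run-length collapse, used as the meeting point of the two proofs
def pvRle : List Char → List Char
  | [] => []
  | [a] => [a]
  | a :: b :: t => if a = b then pvRle (b :: t) else a :: pvRle (b :: t)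

-- pvRle with a previous character: drops the leading run of x
def pvRleFrom (x : Char) : List Char → List Char
  | [] => []
  | c :: t => if c = x then pvRleFrom x t else c :: pvRleFrom c t

theorem pvRle_cons (c : Char) (t : List Char) : pvRle (c :: t) = c :: pvRleFrom c t := by
  induction t generalizing c with
  | nil => simp [pvRle, pvRleFrom]
  | cons b t ih =>
    by_cases h : c = b
    · subst h
      simp [pvRle, pvRleFrom, ih]
    · simp [pvRle, pvRleFrom, h, Ne.symm h, ih]

theorem pvDrop_getD_cons (cs : List Char) (p : Nat) (h : p < cs.length) :
    cs.drop p = cs.getD p ' ' :: cs.drop (p + 1) := by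
  rw [List.getD_eq_getElem cs ' ' h, List.drop_eq_getElem_cons h]

-- ---- B side: the fold computes pvRle ----

theorem pvCollapse_from (cs : List Char) (out : List Char) (x : Char)
    (hx : out.getLast? = some x) :
    cs.foldl pvCollapseStep out = out ++ pvRleFrom x cs := by
  induction cs generalizing out x with
  | nil => simp [pvRleFrom]
  | cons c t ih =>
    have hne : out ≠ [] := by intro h; simp [h] at hx
    by_cases h : c = x
    · subst h
      have hstep : pvCollapseStep out c = out := by
        simp [pvCollapseStep, hx, List.isEmpty_eq_false_iff.mpr hne]
      simp only [List.foldl_cons, hstep, pvRleFrom, if_pos rfl]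
      exact ih out c hx
    · have hstep : pvCollapseStep out c = out ++ [c] := by
        simp [pvCollapseStep, hx]
        intro _ e
        exact h e.symm
      simp only [List.foldl_cons, hstep, pvRleFrom, if_neg h]
      rw [ih (out ++ [c]) c (by simp)]
      simp

theorem pvCollapse_eq_rle (cs : List Char) : pvCollapse cs = pvRle cs := by
  cases cs with
  | nil => simp [pvCollapse, pvRle]
  | cons c t =>
    have hstep : pvCollapseStep [] c = [c] := by simp [pvCollapseStep]
    simp only [pvCollapse, List.foldl_cons, hstep]
    rw [pvCollapse_from t [c] c (by simp)]
    simp [pvRle_cons]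

-- ---- A side: the twin-pointer loop compares pvRle of the suffixes ----

theorem pvSkipRun_spec (cs : List Char) (p : Nat) (hp : p < cs.length) :
    pvRle (cs.drop p)
      = cs.getD (pvSkipRun cs cs.length p) ' ' :: pvRle (cs.drop (pvSkipRun cs cs.length p + 1)) := by
  fun_induction pvSkipRun cs cs.length p with
  | case1 p h ih =>
    obtain ⟨hlt, heq⟩ := h
    have hd1 := pvDrop_getD_cons cs p hp
    have hd2 := pvDrop_getD_cons cs (p + 1) hlt
    rw [hd1, hd2, pvRle, if_pos (by rw [heq]), ← hd2]
    exact ih hlt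
  | case2 p h =>
    have hd1 := pvDrop_getD_cons cs p hp
    by_cases hl : p + 1 < cs.length
    · have hne : cs.getD p ' ' ≠ cs.getD (p + 1) ' ' := by tauto
      have hd2 := pvDrop_getD_cons cs (p + 1) hl
      rw [hd1, hd2, pvRle, if_neg hne, ← hd2]
    · have hnil : cs.drop (p + 1) = [] := List.drop_eq_nil_of_le (by omega)
      rw [hd1, hnil]
      rfl

theorem pvRle_drop_ne_nil (cs : List Char) (p : Nat) (h : p < cs.length) :
    pvRle (cs.drop p) ≠ [] := by
  rw [pvDrop_getD_cons cs p h, pvRle_cons]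
  simp

theorem pvLoop_eq (cs1 cs2 : List Char) (p1 p2 : Nat) :
    p1 ≤ cs1.length → p2 ≤ cs2.length →
    pvLoop cs1 cs2 cs1.length cs2.length p1 p2
      = (pvRle (cs1.drop p1) == pvRle (cs2.drop p2)) := by
  fun_induction pvLoop cs1 cs2 cs1.length cs2.length p1 p2 with
  | case1 p1 p2 h q1 q2 hne =>
    intro _ _
    obtain ⟨h1, h2⟩ := h
    rw [pvSkipRun_spec cs1 p1 h1, pvSkipRun_spec cs2 p2 h2]
    simp only [q1, q2] at hne
    rw [List.cons_beq_cons]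
    have : (cs1.getD (pvSkipRun cs1 cs1.length p1) ' ' == cs2.getD (pvSkipRun cs2 cs2.length p2) ' ') = false :=
      beq_eq_false_iff_ne.mpr hne
    rw [this, Bool.false_and]
  | case2 p1 p2 h q1 q2 hne ih =>
    intro _ _
    obtain ⟨h1, h2⟩ := h
    have hq1 := pvSkipRun_lt cs1 cs1.length p1 h1
    have hq2 := pvSkipRun_lt cs2 cs2.length p2 h2
    rw [ih (by omega) (by omega), pvSkipRun_spec cs1 p1 h1, pvSkipRun_spec cs2 p2 h2]
    simp only [q1, q2] at hne
    rw [Decidable.not_not] at hne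
    rw [List.cons_beq_cons, beq_iff_eq.mpr hne, Bool.true_and]
  | case3 p1 p2 h =>
    intro hp1 hp2
    by_cases e1 : p1 = cs1.length
    · by_cases e2 : p2 = cs2.length
      · subst e1; subst e2
        simp [List.drop_length, pvRle]
      · have hlt2 : p2 < cs2.length := by omega
        have hne2 := pvRle_drop_ne_nil cs2 p2 hlt2
        have hb2 : (p2 == cs2.length) = false := beq_eq_false_iff_ne.mpr e2
        have hb1 : (p1 == cs1.length) = true := beq_iff_eq.mpr e1
        rw [hb1, hb2, e1, List.drop_length, Bool.true_and]
        cases hx : pvRle (cs2.drop p2) with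
        | nil => exact absurd hx hne2
        | cons a t => simp [pvRle]
    · have hlt1 : p1 < cs1.length := by omega
      have e2 : p2 = cs2.length := by
        rcases Nat.lt_or_ge p2 cs2.length with hl | hg
        · exact absurd ⟨hlt1, hl⟩ h
        · omega
      have hne1 := pvRle_drop_ne_nil cs1 p1 hlt1
      have hb1 : (p1 == cs1.length) = false := beq_eq_false_iff_ne.mpr e1
      rw [hb1, e2, List.drop_length, Bool.false_and]
      cases hx : pvRle (cs1.drop p1) with
      | nil => exact absurd hx hne1
      | cons a t => simp [pvRle]

-- ===== VERDICT (by name: the statement is the Claim_ definition above) =====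
theorem stringSimilar_spec : Claim_equal_stringSimilar := by
  intro s1 s2 _
  unfold Spec_stringSimilar stringSimilar stringSimilar_alt
  rw [pvLoop_eq _ _ 0 0 (by omega) (by omega), pvCollapse_eq_rle, pvCollapse_eq_rle]
  simp
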